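-- pv_equiv track=rewrite | github.com/shjn3/CS114.L21 | Assignments/Weak4.1-Final/Problem_Game_con_ran.py | path_snake
-- ===== SOURCE A (Python) =====
-- foot = [[0,-1],[-1,0],[0,1],[1,0]]
--
-- def path_snake(_body,_head):
--     snake = []
--     _snake=[]
--     length = len(_body)
--     length+=1
--     _head_x=_head[1]
--     _head_y=_head[2]
--     snake.append([[_head_x,_head_y]])
--
--     while snake:
--         node = snake.pop()
--         if len(node) == length:
--             _snake = node
--             break
--         for i in range(4):
--             x = node[-1][0] + foot[i][0]
--             y = node[-1][1] + foot[i][1]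
--             if [x,y] in _body:
--                 if [x,y] not in node:
--                     snake.append(node+[[x,y]])
--     return _snake
-- ===== SOURCE B (Python) =====
-- def path_snake(_body, _head):
--     length = len(_body) + 1
--
--     def dfs(path):
--         if len(path) == length:
--             return path
--         x0, y0 = path[-1]
--         for dx, dy in ((1, 0), (0, 1), (-1, 0), (0, -1)):
--             c = [x0 + dx, y0 + dy]
--             if c in _body and c not in path:
--                 r = dfs(path + [c])
--                 if r:
--                     return r
--         return []
--
--     return dfs([[_head[1], _head[2]]])
-- ===== Notes on version B (the rewrite author's own statement) =====
-- stated objective: simpler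
-- what changed: A's explicit path-stack while-loop is replaced by recursive backtracking on the call stack (dfs over the four directions in reverse order, returning the first completed path), removing the stack bookkeeping.
import Mathlib
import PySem

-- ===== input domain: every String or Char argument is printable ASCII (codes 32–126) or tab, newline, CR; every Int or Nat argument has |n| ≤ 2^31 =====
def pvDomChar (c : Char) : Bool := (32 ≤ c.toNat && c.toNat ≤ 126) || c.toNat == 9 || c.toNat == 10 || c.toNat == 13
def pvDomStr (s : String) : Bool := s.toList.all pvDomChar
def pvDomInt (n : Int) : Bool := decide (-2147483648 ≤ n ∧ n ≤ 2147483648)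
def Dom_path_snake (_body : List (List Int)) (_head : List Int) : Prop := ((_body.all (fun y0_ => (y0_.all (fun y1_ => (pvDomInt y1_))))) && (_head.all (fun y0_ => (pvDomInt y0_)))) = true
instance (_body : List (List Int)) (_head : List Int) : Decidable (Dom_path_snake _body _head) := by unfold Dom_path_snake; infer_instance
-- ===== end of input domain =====

-- B replaces A's explicit path-stack DFS by call-stack recursive backtracking over the same
-- search tree (directions iterated in reverse to preserve the stack's LIFO order); objective: simpler.

-- number of body cells not yet on the path: termination measure of the search
def kB (body node : List (List Int)) : Nat := (body.filter (fun c => decide (c ∉ node))).length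

def msr (body : List (List Int)) (stack : List (List (List Int))) : Nat :=
  (stack.map (fun n => 5 ^ kB body n)).sum

lemma kB_append_lt (body node : List (List Int)) (c : List Int)
    (hc : c ∈ body) (hn : c ∉ node) : kB body (node ++ [c]) < kB body node := by
  have hsub : (body.filter (fun x => decide (x ∉ node ++ [c]))).Sublist
      (body.filter (fun x => decide (x ∉ node))) := by
    apply List.monotone_filter_right
    intro a ha
    simp at ha ⊢
    exact ha.1
  have hc1 : c ∈ body.filter (fun x => decide (x ∉ node)) := by
    simp [List.mem_filter, hc, hn]
  have hc2 : c ∉ body.filter (fun x => decide (x ∉ node ++ [c])) := by simp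
  have hle := hsub.length_le
  unfold kB
  rcases lt_or_eq_of_le hle with h | h
  · exact h
  · exact absurd (hsub.eq_of_length h ▸ hc1) hc2

lemma kB_pos_of_new (body node : List (List Int)) (c : List Int)
    (hc : c ∈ body) (hn : c ∉ node) : 0 < kB body node := by
  unfold kB
  exact List.length_pos_of_mem (by simp [List.mem_filter, hc, hn] : c ∈ _)

def footA : List (List Int) := [[0,-1],[-1,0],[0,1],[1,0]]

def lastCell (node : List (List Int)) : List Int := (PySem.List.pyGet? node (-1)).getD []

def childA (node : List (List Int)) (i : Nat) : List Int :=
  [(lastCell node).getD 0 0 + (footA.getD i []).getD 0 0,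
   (lastCell node).getD 1 0 + (footA.getD i []).getD 1 0]

def pushChildren (body node : List (List Int)) (st : List (List (List Int))) :
    List (List (List Int)) :=
  (List.range 4).foldl
    (fun s i => if childA node i ∈ body ∧ childA node i ∉ node then (node ++ [childA node i]) :: s else s) st

lemma pushChildren_msr_lt (body node : List (List Int)) (st : List (List (List Int))) :
    msr body (pushChildren body node st) < 5 ^ kB body node + msr body st := by
  set e : Nat := if kB body node = 0 then 0 else 5 ^ (kB body node - 1) with he
  have key : ∀ (l : List Nat) (s : List (List (List Int))),
      msr body (l.foldl (fun s i => if childA node i ∈ body ∧ childA node i ∉ node then (node ++ [childA node i]) :: s else s) s) ≤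
      msr body s + l.length * e := by
    intro l
    induction l with
    | nil => intro s; simp
    | cons i l ih =>
      intro s
      simp only [List.foldl_cons]
      refine le_trans (ih _) ?_
      have hstep : msr body (if childA node i ∈ body ∧ childA node i ∉ node then (node ++ [childA node i]) :: s else s) ≤
          msr body s + e := by
        split_ifs with h
        · have hpos := kB_pos_of_new body node _ h.1 h.2
        

          have hlt := kB_append_lt body node (childA node i) h.1 h.2
          have hpow : 5 ^ kB body (node ++ [childA node i]) ≤ 5 ^ (kB body node - 1) :=
            Nat.pow_le_pow_right (by norm_num) (by omega)
          have he' : e = 5 ^ (kB body node - 1) := by rw [he, if_neg (by omega)]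
          simp [msr]
          omega
        · omega
      calc msr body _ + l.length * e ≤ (msr body s + e) + l.length * e := Nat.add_le_add_right hstep _
        _ = msr body s + (l.length + 1) * e := by ring
      
  have h4 := key (List.range 4) st
  simp only [List.length_range] at h4
  unfold pushChildren
  by_cases hk : kB body node = 0
  · have : e = 0 := by simp [he, hk]
    have h5 : (0:Nat) < 5 ^ kB body node := Nat.pow_pos (by norm_num)
    omega
  · have he' : e = 5 ^ (kB body node - 1) := by simp [he, hk]
    have hlt : 4 * 5 ^ (kB body node - 1) < 5 ^ kB body node := by
      have h5 : 5 ^ kB body node = 5 * 5 ^ (kB body node - 1) := by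
        rw [← pow_succ']
        congr 1
        omega
      have hp : 0 < 5 ^ (kB body node - 1) := Nat.pow_pos (by norm_num)
      omega
    rw [he'] at h4
    omega

def loopA (body : List (List Int)) (len : Int) : List (List (List Int)) → List (List Int)
  | [] => []
  | node :: rest =>
    if (node.length : Int) = len then node
    else loopA body len (pushChildren body node rest)
termination_by stack => msr body stack
decreasing_by
  have := pushChildren_msr_lt body node rest
  simp [msr] at this ⊢
  omega

def deltasB : List (Int × Int) := [(1,0),(0,1),(-1,0),(0,-1)]

-- path[-1] unpacked and shifted by the direction d (x0+dx, y0+dy)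
def nextCell (path : List (List Int)) (d : Int × Int) : List Int :=
  let lc := (PySem.List.pyGet? path (-1)).getD []
  [lc.getD 0 0 + d.1, lc.getD 1 0 + d.2]

mutual
def dfsB (body : List (List Int)) (len : Int) (path : List (List Int)) : List (List Int) :=
  if (path.length : Int) = len then path
  else tryB body len path deltasB
termination_by (kB body path, deltasB.length + 1)
decreasing_by
  exact Prod.Lex.right _ (by simp [deltasB])

def tryB (body : List (List Int)) (len : Int) (path : List (List Int)) :
    List (Int × Int) → List (List Int)
  | [] => []
  | d :: rest =>
    let c := nextCell path d
    if h : c ∈ body ∧ c ∉ path then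
      let r := dfsB body len (path ++ [c])
      if r = [] then tryB body len path rest else r
    else tryB body len path rest
termination_by ds => (kB body path, ds.length)
decreasing_by
  · exact Prod.Lex.left _ _ (kB_append_lt body path _ h.1 h.2)
  · exact Prod.Lex.right _ (by simp)
  · exact Prod.Lex.right _ (by simp)
end

-- ===== PORT A =====
def path_snake (_body : List (List Int)) (_head : List Int) : List (List Int) :=
  let length : Int := (_body.length : Int) + 1
  let hx := (PySem.List.pyGet? _head 1).getD 0
  let hy := (PySem.List.pyGet? _head 2).getD 0
  loopA _body length [[[hx, hy]]]

-- ===== PORT B =====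
def path_snake_alt (_body : List (List Int)) (_head : List Int) : List (List Int) :=
  let length : Int := (_body.length : Int) + 1
  let hx := (PySem.List.pyGet? _head 1).getD 0
  let hy := (PySem.List.pyGet? _head 2).getD 0
  dfsB _body length [[hx, hy]]

-- ===== PRECONDITION & SPEC =====
-- A raises IndexError reading _head[1] / _head[2] when _head has fewer than 3 elements (B too)
def Pre_path_snake (_body : List (List Int)) (_head : List Int) : Prop := 3 ≤ _head.length
instance (_body : List (List Int)) (_head : List Int) : Decidable (Pre_path_snake _body _head) := by unfold Pre_path_snake; infer_instance

def pvWitness_path_snake : List (List Int) × List Int := ([[0, 1]], [9, 0, 0])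

def Spec_path_snake (_body : List (List Int)) (_head : List Int) (out : List (List Int)) : Prop := out = path_snake_alt _body _head
instance (_body : List (List Int)) (_head : List Int) (out : List (List Int)) : Decidable (Spec_path_snake _body _head out) := by unfold Spec_path_snake; infer_instance

-- ===== CLAIM (what is proved, stated in full; the proofs are below) =====
def Claim_equal_path_snake : Prop := ∀ (_body : List (List Int)) (_head : List Int), Dom_path_snake _body _head → Pre_path_snake _body _head → Spec_path_snake _body _head (path_snake _body _head)

-- ===== LEMMAS AND PROOFS =====

def childrenOf (body path : List (List Int)) (ds : List (Int × Int)) : List (List (List Int)) :=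
  ds.filterMap (fun d =>
    if nextCell path d ∈ body ∧ nextCell path d ∉ path then some (path ++ [nextCell path d]) else none)

def tryAll (body : List (List Int)) (len : Int) : List (List (List Int)) → List (List Int)
  | [] => []
  | p :: ps => if dfsB body len p = [] then tryAll body len ps else dfsB body len p

lemma tryB_eq_tryAll (body : List (List Int)) (len : Int) (path : List (List Int))
    (ds : List (Int × Int)) : tryB body len path ds = tryAll body len (childrenOf body path ds) := by
  induction ds with
  | nil => simp [tryB, childrenOf, tryAll]
  | cons d rest ih =>
    have hrest : childrenOf body path (d :: rest) =
        (if nextCell path d ∈ body ∧ nextCell path d ∉ path then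
          (path ++ [nextCell path d]) :: childrenOf body path rest
        else childrenOf body path rest) := by
      simp only [childrenOf, List.filterMap_cons]
      split_ifs <;> rfl
    rw [tryB, hrest]
    split_ifs with h
    · rw [tryAll]
      by_cases h2 : dfsB body len (path ++ [nextCell path d]) = [] <;> simp [h2, ih]
    · exact ih

lemma tryAll_append (body : List (List Int)) (len : Int) (xs ys : List (List (List Int))) :
    tryAll body len (xs ++ ys) =
      if tryAll body len xs = [] then tryAll body len ys else tryAll body len xs := by
  induction xs with
  | nil => simp [tryAll]
  | cons p ps ih =>
    simp only [List.cons_append, tryAll]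
    by_cases h : dfsB body len p = [] <;> simp [h, ih]

lemma pushChildren_eq (body node : List (List Int)) (st : List (List (List Int))) :
    pushChildren body node st = childrenOf body node deltasB ++ st := by
  have e0 : childA node 0 = nextCell node (0,-1) := rfl
  have e1 : childA node 1 = nextCell node (-1,0) := rfl
  have e2 : childA node 2 = nextCell node (0,1) := rfl
  have e3 : childA node 3 = nextCell node (1,0) := rfl
  unfold pushChildren childrenOf
  rw [show List.range 4 = [0,1,2,3] from rfl]
  simp only [List.foldl_cons, List.foldl_nil, deltasB, List.filterMap_cons, List.filterMap_nil,
    e0, e1, e2, e3]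
  split_ifs <;> simp

lemma loopA_eq_tryAll (body : List (List Int)) (len : Int) (hl : 1 ≤ len) :
    ∀ (n : Nat) (ps rest : List (List (List Int))), msr body (ps ++ rest) ≤ n →
      loopA body len (ps ++ rest) =
        if tryAll body len ps = [] then loopA body len rest else tryAll body len ps := by
  intro n
  induction n with
  | zero =>
    intro ps rest h
    cases ps with
    | nil => simp [tryAll]
    | cons p ps' =>
      exfalso
      have hpos : 0 < msr body ((p :: ps') ++ rest) := by
        simp [msr]
      omega
  | succ n ih =>
    intro ps rest h
    cases ps with
    | nil => simp [tryAll]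
    | cons p ps' =>
      rw [List.cons_append, loopA]
      by_cases hlen : (p.length : Int) = len
      · have hp : p ≠ [] := by
          intro hnil
          subst hnil
          simp at hlen
          omega
        rw [if_pos hlen]
        have hdfs : dfsB body len p = p := by rw [dfsB, if_pos hlen]
        simp [tryAll, hdfs, hp]
      · rw [if_neg hlen, pushChildren_eq, ← List.append_assoc]
        have hm : msr body ((childrenOf body p deltasB ++ ps') ++ rest) ≤ n := by
          have h1 := pushChildren_msr_lt body p (ps' ++ rest)
          rw [pushChildren_eq, ← List.append_assoc] at h1
          have h2 : msr body ((p :: ps') ++ rest) = 5 ^ kB body p + msr body (ps' ++ rest) := by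
            simp [msr]
          omega
        rw [ih _ _ hm, tryAll_append, ← tryB_eq_tryAll]
        have hdfs : dfsB body len p = tryB body len p deltasB := by rw [dfsB, if_neg hlen]
        rw [← hdfs]
        simp only [tryAll]

theorem main_eq (body : List (List Int)) (head : List Int) :
    path_snake body head = path_snake_alt body head := by
  unfold path_snake path_snake_alt
  have hl : (1 : Int) ≤ (body.length : Int) + 1 := by omega
  have h := loopA_eq_tryAll body ((body.length : Int) + 1) hl
    (msr body ([[[(PySem.List.pyGet? head 1).getD 0, (PySem.List.pyGet? head 2).getD 0]]] ++ []))
    [[[(PySem.List.pyGet? head 1).getD 0, (PySem.List.pyGet? head 2).getD 0]]] [] le_rfl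
  simp only [List.append_nil] at h
  rw [h]
  simp only [tryAll, loopA]
  by_cases hd : dfsB body ((body.length : Int) + 1)
      [[(PySem.List.pyGet? head 1).getD 0, (PySem.List.pyGet? head 2).getD 0]] = [] <;>
    simp [hd]

-- ===== VERDICT (by name: the statement is the Claim_ definition above) =====
theorem path_snake_spec : Claim_equal_path_snake := by
  intro _body _head _ _
  unfold Spec_path_snake
  exact main_eq _body _head
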